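-- pv_equiv track=rewrite | github.com/Renelog06/Design-and-Implement-a-Smart-Parking-Management-System-SPMS- | report.py | most_used_slots
-- ===== SOURCE A (Python) =====
-- def most_used_slots(transactions):
--     count={}
--     for transaction in transactions:
--         if transaction["status"] == "completed":
--             slot = transaction["slot_id"]
--             count[slot] = count.get(slot, 0) + 1
--     most_slots = []
--     max_count = 0
--     for slot, c in count.items():
--         if c > max_count:
--             max_count = c
--     for slot, c in count.items():
--         if c == max_count:
--             most_slots.append(slot)
--     return most_slots
-- ===== SOURCE B (Python) =====
-- def most_used_slots(transactions):
--     count = {}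
--     for transaction in transactions:
--         if transaction["status"] == "completed":
--             slot = transaction["slot_id"]
--             count[slot] = count.get(slot, 0) + 1
--     max_count = 0
--     most_slots = []
--     for slot, c in count.items():
--         if c > max_count:
--             max_count = c
--             most_slots = [slot]
--         elif c == max_count:
--             most_slots.append(slot)
--     return most_slots
-- ===== Notes on version B (the rewrite author's own statement) =====
-- stated objective: simpler
-- what changed: The two separate scans of the count dict (find max, then collect matches) are fused into one pass that resets the result list when a strictly larger count appears and appends on ties.
import Mathlib
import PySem

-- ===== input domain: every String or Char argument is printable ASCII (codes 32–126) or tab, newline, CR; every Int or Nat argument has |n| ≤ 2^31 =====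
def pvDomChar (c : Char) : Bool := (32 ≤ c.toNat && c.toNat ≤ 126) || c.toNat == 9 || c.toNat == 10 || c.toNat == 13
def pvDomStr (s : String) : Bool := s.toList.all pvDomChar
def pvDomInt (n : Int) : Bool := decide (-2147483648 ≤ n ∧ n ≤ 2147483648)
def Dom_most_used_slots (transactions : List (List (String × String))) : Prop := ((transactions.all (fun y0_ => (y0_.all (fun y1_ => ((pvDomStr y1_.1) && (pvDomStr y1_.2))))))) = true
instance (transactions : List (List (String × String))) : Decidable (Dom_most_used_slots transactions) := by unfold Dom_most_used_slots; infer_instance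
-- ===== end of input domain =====

-- B fuses A's two scans of the count dict (find max, then collect matches) into one pass; same cost, one loop fewer.

-- shared helper: the counting loop, textually identical in A and B
-- (transaction["k"] on a dict = first-match lookup on the association list; a missing key is a KeyError, excluded by Pre_)
def pvCount (transactions : List (List (String × String))) : PySem.Dict String Int :=
  transactions.foldl (fun d t =>
    if t.lookup "status" = some "completed" then
      match t.lookup "slot_id" with
      | some slot => d.modify slot 0 (· + 1)
      | none => d          -- KeyError in Python; unreachable under Pre_
    else d) PySem.Dict.empty

-- ===== PORT A =====
def most_used_slots (transactions : List (List (String × String))) : List String :=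
  let count := pvCount transactions
  let max_count := count.items.foldl (fun max_count p => if p.2 > max_count then p.2 else max_count) 0
  count.items.foldl (fun most_slots p => if p.2 = max_count then most_slots ++ [p.1] else most_slots) []

-- ===== PORT B =====
def most_used_slots_alt (transactions : List (List (String × String))) : List String :=
  let count := pvCount transactions
  (count.items.foldl (fun (st : Int × List String) p =>
      if p.2 > st.1 then (p.2, [p.1])
      else if p.2 = st.1 then (st.1, st.2 ++ [p.1])
      else st) ((0 : Int), ([] : List String))).2

-- ===== PRECONDITION & SPEC =====
-- Pre_ excludes exactly the inputs on which Python A raises KeyError: a transaction without a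
-- "status" key, or a completed transaction without a "slot_id" key.
def Pre_most_used_slots (transactions : List (List (String × String))) : Prop :=
  ∀ t ∈ transactions, (t.lookup "status").isSome = true ∧
    (t.lookup "status" = some "completed" → (t.lookup "slot_id").isSome = true)
instance (transactions : List (List (String × String))) : Decidable (Pre_most_used_slots transactions) := by unfold Pre_most_used_slots; infer_instance

def pvWitness_most_used_slots : (List (List (String × String))) :=
  [[("status", "completed"), ("slot_id", "S1")], [("status", "pending")]]

def Spec_most_used_slots (transactions : List (List (String × String))) (out : List String) : Prop := out = most_used_slots_alt transactions
instance (transactions : List (List (String × String))) (out : List String) : Decidable (Spec_most_used_slots transactions out) := by unfold Spec_most_used_slots; infer_instance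

-- ===== CLAIM (what is proved, stated in full; the proofs are below) =====
def Claim_equal_most_used_slots : Prop := ∀ (transactions : List (List (String × String))), Dom_most_used_slots transactions → Pre_most_used_slots transactions → Spec_most_used_slots transactions (most_used_slots transactions)

-- ===== LEMMAS AND PROOFS =====

-- running maximum of the counts, as in A's first scan
def pvMaxAux (l : List (String × Int)) (m : Int) : Int :=
  l.foldl (fun max_count p => if p.2 > max_count then p.2 else max_count) m

lemma pvMaxAux_cons (a : String × Int) (l : List (String × Int)) (m : Int) :
    pvMaxAux (a :: l) m = pvMaxAux l (if a.2 > m then a.2 else m) := rfl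

lemma pvMaxAux_ge (l : List (String × Int)) (m : Int) : m ≤ pvMaxAux l m := by
  induction l generalizing m with
  | nil => simp [pvMaxAux]
  | cons a l ih =>
    rw [pvMaxAux_cons]
    by_cases h : a.2 > m
    · rw [if_pos h]; exact le_trans (by omega) (ih a.2)
    · rw [if_neg h]; exact ih m

-- A's second scan: an append-if loop is the filtered projection
lemma pvCollect_eq (l : List (String × Int)) (M : Int) (acc : List String) :
    l.foldl (fun most_slots p => if p.2 = M then most_slots ++ [p.1] else most_slots) acc
    = acc ++ (l.filter (fun p => p.2 = M)).map Prod.fst := by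
  induction l generalizing acc with
  | nil => simp
  | cons a l ih =>
    rw [List.foldl_cons, List.filter_cons]
    by_cases h : a.2 = M
    · rw [if_pos h, ih]; simp [h]
    · rw [if_neg h, ih]; simp [h]

-- B's fused loop computes (final max; the prefix result iff nothing beat it, then all maximal slots in order)
lemma pvFused_eq (l : List (String × Int)) (m : Int) (s : List String) :
    l.foldl (fun (st : Int × List String) p =>
      if p.2 > st.1 then (p.2, [p.1])
      else if p.2 = st.1 then (st.1, st.2 ++ [p.1])
      else st) (m, s)
    = (pvMaxAux l m,
       (if pvMaxAux l m = m then s else []) ++ (l.filter (fun p => p.2 = pvMaxAux l m)).map Prod.fst) := by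
  induction l generalizing m s with
  | nil => simp [pvMaxAux]
  | cons a l ih =>
    rw [List.foldl_cons, List.filter_cons, pvMaxAux_cons]
    by_cases hgt : a.2 > m
    · rw [if_pos hgt, if_pos hgt, ih]
      have hge := pvMaxAux_ge l a.2
      have hne : pvMaxAux l a.2 ≠ m := by omega
      rw [if_neg hne]
      by_cases hc : a.2 = pvMaxAux l a.2
      · rw [if_pos hc.symm, if_pos (by simpa using hc)]
        simp
      · rw [if_neg (fun h => hc h.symm), if_neg (by simpa using hc)]
    · rw [if_neg hgt, if_neg hgt]
      by_cases heq : a.2 = m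
      · rw [if_pos heq, ih]
        by_cases he : pvMaxAux l m = m
        · rw [if_pos he, if_pos he, if_pos (by simp [heq, he])]
          simp
        · have hne2 : ¬ (a.2 = pvMaxAux l m) := by omega
          rw [if_neg he, if_neg he, if_neg (show ¬ (decide (a.2 = pvMaxAux l m) = true) by simpa using hne2)]
      · rw [if_neg heq, ih]
        have hge := pvMaxAux_ge l m
        have hlt : a.2 < m := by omega
        have hne2 : ¬ (a.2 = pvMaxAux l m) := by omega
        rw [if_neg (show ¬ (decide (a.2 = pvMaxAux l m) = true) by simpa using hne2)]

-- ===== VERDICT (by name: the statement is the Claim_ definition above) =====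
theorem most_used_slots_spec : Claim_equal_most_used_slots := by
  intro transactions _ _
  show most_used_slots transactions = most_used_slots_alt transactions
  have h2 := congrArg Prod.snd (pvFused_eq (pvCount transactions).items 0 [])
  calc most_used_slots transactions
      = ((pvCount transactions).items.filter
          (fun p => p.2 = pvMaxAux (pvCount transactions).items 0)).map Prod.fst :=
        pvCollect_eq (pvCount transactions).items _ []
    _ = most_used_slots_alt transactions := by
        show _ = (List.foldl (fun (st : Int × List String) p =>
            if p.2 > st.1 then (p.2, [p.1])
            else if p.2 = st.1 then (st.1, st.2 ++ [p.1])
            else st) ((0 : Int), ([] : List String)) (pvCount transactions).items).2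
        rw [h2]
        simp
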